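-- pv_equiv track=rewrite | github.com/PolinaSavelyeva/Exers | Yandex_algorithms_6.0/Homeworks/3/E.py | parse_str
-- ===== SOURCE A (Python) =====
-- def parse_str(str):
--     i = j = 0
--     input = []
--     while i < len(str):
--         while j < len(str) and str[j].isdigit():
--             j += 1
--         if i != j:
--             if str[i:j].replace(" ", "") != "":
--                 input.append(str[i:j])
--             i = j
--         else:
--             if str[i].replace(" ", "") != "":
--                 input.append(str[i])
--             i += 1
--             j = i
--     return input
-- ===== SOURCE B (Python) =====
-- def parse_str(str):
--     out = []
--     num = ""
--     for ch in str:
--         if ch.isdigit():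
--             num += ch
--         else:
--             if num:
--                 out.append(num)
--                 num = ""
--             if ch != " ":
--                 out.append(ch)
--     if num:
--         out.append(num)
--     return out
-- ===== Notes on version B (the rewrite author's own statement) =====
-- stated objective: simpler
-- what changed: Replaced the two-index (i/j) while-loop with slicing by a single for-each pass that accumulates the pending digit run in a string and flushes it at each non-digit boundary (and at the end); dropping the index bookkeeping, slicing and per-char replace() calls gives a constant-factor speedup.
import Mathlib
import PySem

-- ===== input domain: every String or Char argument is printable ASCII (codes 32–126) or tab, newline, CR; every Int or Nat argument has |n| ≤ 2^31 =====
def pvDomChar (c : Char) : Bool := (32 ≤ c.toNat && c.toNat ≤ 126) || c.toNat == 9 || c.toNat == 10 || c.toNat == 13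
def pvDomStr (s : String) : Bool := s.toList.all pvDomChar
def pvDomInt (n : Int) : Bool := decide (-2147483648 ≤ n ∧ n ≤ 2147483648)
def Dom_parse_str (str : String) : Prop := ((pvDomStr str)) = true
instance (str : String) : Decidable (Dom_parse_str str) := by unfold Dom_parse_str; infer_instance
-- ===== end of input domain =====

-- B replaces A's two-index while-loop (with slicing) by a single for-each pass that
-- accumulates the pending digit run and flushes it at non-digit boundaries (objective: simpler).


-- ===== PORT A =====
-- the inner `while j < len(str) and str[j].isdigit(): j += 1`
def pvInnerJ (cs : List Char) (j : Nat) : Nat :=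
  if h : j < cs.length then
    if PySem.Chars.isdigit cs[j] then pvInnerJ cs (j + 1) else j
  else j
termination_by cs.length - j

-- the outer while-loop; `fuel` is only a totality guard (the loop advances i every iteration)
def pvLoopA : Nat → List Char → Nat → Nat → List String → List String
  | 0, _, _, _, acc => acc
  | fuel + 1, cs, i, j, acc =>
    if hi : i < cs.length then
      if i ≠ pvInnerJ cs j then
        -- str[i:j] is (cs.drop i).take (j' - i); `.replace(" ", "") != ""`: replacing the
        -- single char ' ' by '' is exactly dropping all spaces, ported as `filter (· ≠ ' ') ≠ []` (exact)
        pvLoopA fuel cs (pvInnerJ cs j) (pvInnerJ cs j)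
          (if ((cs.drop i).take (pvInnerJ cs j - i)).filter (fun c => c ≠ ' ') ≠ [] then
            acc ++ [String.ofList ((cs.drop i).take (pvInnerJ cs j - i))]
          else acc)
      else
        pvLoopA fuel cs (i + 1) (i + 1)
          (if [cs[i]].filter (fun c => c ≠ ' ') ≠ [] then acc ++ [String.ofList [cs[i]]] else acc)
    else acc

def parse_str (str : String) : List String :=
  pvLoopA (str.toList.length + 1) str.toList 0 0 []

-- ===== PORT B =====
-- one loop step: flush the pending number at a non-digit, then maybe append the char
def pvStepB (st : List String × List Char) (ch : Char) : List String × List Char :=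
  if PySem.Chars.isdigit ch then (st.1, st.2 ++ [ch])
  else
    let out1 := if st.2 ≠ [] then st.1 ++ [String.ofList st.2] else st.1
    let out2 := if ch ≠ ' ' then out1 ++ [String.ofList [ch]] else out1
    (out2, [])

def parse_str_alt (str : String) : List String :=
  let st := str.toList.foldl pvStepB ([], [])
  if st.2 ≠ [] then st.1 ++ [String.ofList st.2] else st.1

-- ===== PRECONDITION & SPEC =====
def Spec_parse_str (str : String) (out : List String) : Prop := out = parse_str_alt str
instance (str : String) (out : List String) : Decidable (Spec_parse_str str out) := by unfold Spec_parse_str; infer_instance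

-- ===== CLAIM (what is proved, stated in full; the proofs are below) =====
def Claim_equal_parse_str : Prop := ∀ (str : String), Dom_parse_str str → Spec_parse_str str (parse_str str)

-- ===== LEMMAS AND PROOFS =====

-- B's run from an intermediate state, as a function of the remaining characters
def pvBRes (l : List Char) (out : List String) (num : List Char) : List String :=
  let st := l.foldl pvStepB (out, num)
  if st.2 ≠ [] then st.1 ++ [String.ofList st.2] else st.1

lemma pvInnerJ_eq (cs : List Char) (j : Nat) :
    pvInnerJ cs j = j + ((cs.drop j).takeWhile PySem.Chars.isdigit).length := by
  fun_induction pvInnerJ cs j with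
  | case1 j h hd ih =>
    rw [ih, List.drop_eq_getElem_cons h, List.takeWhile_cons_of_pos hd]
    simp; omega
  | case2 j h hd =>
    rw [List.drop_eq_getElem_cons h, List.takeWhile_cons_of_neg (by simp [hd])]
    simp
  | case3 j h =>
    rw [List.drop_eq_nil_of_le (by omega)]
    simp

lemma pvNotSpace_of_isdigit (c : Char) (h : PySem.Chars.isdigit c = true) : c ≠ ' ' := by
  rintro rfl; simp [PySem.Chars.isdigit] at h

lemma pvBRes_digits (ds : List Char) (h : ∀ c ∈ ds, PySem.Chars.isdigit c = true) :
    ∀ rest out num, pvBRes (ds ++ rest) out num = pvBRes rest out (num ++ ds) := by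
  induction ds with
  | nil => simp
  | cons d ds ih =>
    intro rest out num
    have hd : PySem.Chars.isdigit d = true := h d (by simp)
    simp only [pvBRes, List.cons_append, List.foldl_cons, pvStepB, hd, if_pos]
    have := ih (fun c hc => h c (by simp [hc])) rest out (num ++ [d])
    simpa [pvBRes] using this

lemma pvBRes_flush (r : List Char) (out : List String) (num : List Char)
    (h : r = [] ∨ ∃ c t, r = c :: t ∧ PySem.Chars.isdigit c = false) :
    pvBRes r out num = pvBRes r (if num ≠ [] then out ++ [String.ofList num] else out) [] := by
  rcases h with rfl | ⟨c, t, rfl, hc⟩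
  · simp [pvBRes]
  · have hstep : pvStepB (out, num) c
        = pvStepB ((if num ≠ [] then out ++ [String.ofList num] else out), []) c := by
      simp [pvStepB, hc]
    simp only [pvBRes, List.foldl_cons, hstep]

lemma pvBRes_cons_nondigit (c : Char) (hc : PySem.Chars.isdigit c = false)
    (rest : List Char) (out : List String) :
    pvBRes (c :: rest) out []
      = pvBRes rest (if c ≠ ' ' then out ++ [String.ofList [c]] else out) [] := by
  have hstep : pvStepB (out, []) c
      = ((if c ≠ ' ' then out ++ [String.ofList [c]] else out), []) := by
    simp [pvStepB, hc]
  simp only [pvBRes, List.foldl_cons, hstep]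

lemma pvLoopA_eq (cs : List Char) :
    ∀ fuel i acc, cs.length - i < fuel →
      pvLoopA fuel cs i i acc = pvBRes (cs.drop i) acc [] := by
  intro fuel
  induction fuel with
  | zero => intro i acc h; omega
  | succ fuel ih =>
    intro i acc hfuel
    by_cases hi : i < cs.length
    · have hdrop : cs.drop i = cs[i] :: cs.drop (i + 1) := List.drop_eq_getElem_cons hi
      by_cases hd : PySem.Chars.isdigit cs[i] = true
      · -- digit at i: A appends the whole digit run, B accumulates it and flushes
        set t := (cs.drop i).takeWhile PySem.Chars.isdigit with ht
        have htc : t = cs[i] :: (cs.drop (i + 1)).takeWhile PySem.Chars.isdigit := by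
          rw [ht, hdrop, List.takeWhile_cons_of_pos hd]
        have hj' : pvInnerJ cs i = i + t.length := pvInnerJ_eq cs i
        have htpos : 0 < t.length := by rw [htc]; simp
        have hne : i ≠ pvInnerJ cs i := by omega
        have htok : (cs.drop i).take (pvInnerJ cs i - i) = t := by
          rw [hj', show i + t.length - i = t.length from by omega]
          conv_lhs => rw [← List.takeWhile_append_dropWhile (p := PySem.Chars.isdigit) (l := cs.drop i)]
          exact List.take_left
        have hdropj : cs.drop (pvInnerJ cs i) = (cs.drop i).dropWhile PySem.Chars.isdigit := by
          rw [hj', ← List.drop_drop]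
          conv_lhs => rw [← List.takeWhile_append_dropWhile (p := PySem.Chars.isdigit) (l := cs.drop i)]
          exact List.drop_left
        have hfilter : t.filter (fun c => c ≠ ' ') ≠ [] := by
          rw [htc, List.filter_cons, if_pos (by simp [pvNotSpace_of_isdigit _ hd])]
          simp
        have hsplit : cs.drop i = t ++ (cs.drop i).dropWhile PySem.Chars.isdigit := by
          rw [ht, List.takeWhile_append_dropWhile]
        rw [pvLoopA, dif_pos hi, if_pos hne, htok, if_pos hfilter,
          ih (pvInnerJ cs i) (acc ++ [String.ofList t]) (by omega), hdropj]
        conv_rhs => rw [hsplit]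
        rw [pvBRes_digits t (fun c hc => List.mem_takeWhile_imp hc) _ acc [], List.nil_append,
          pvBRes_flush _ acc t ?side, if_pos (by simp [htc])]
        case side =>
          rcases he : (cs.drop i).dropWhile PySem.Chars.isdigit with _ | ⟨c, r⟩
          · exact Or.inl rfl
          · refine Or.inr ⟨c, r, rfl, ?_⟩
            have hnn : (cs.drop i).dropWhile PySem.Chars.isdigit ≠ [] := by rw [he]; simp
            have := List.head_dropWhile_not PySem.Chars.isdigit hnn
            rwa [show ((cs.drop i).dropWhile PySem.Chars.isdigit).head hnn = c from by
              simp [he]] at this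
      · -- non-digit at i: A appends the single char unless it is a space
        have hj' : pvInnerJ cs i = i := by
          rw [pvInnerJ_eq cs i, hdrop, List.takeWhile_cons_of_neg (by simp [hd])]; simp
        rw [pvLoopA, dif_pos hi, if_neg (by simp [hj']), ih (i + 1) _ (by omega),
          hdrop, pvBRes_cons_nondigit cs[i] (by simpa using hd)]
        by_cases hsp : cs[i] = ' '
        · simp [hsp]
        · simp [hsp]
    · rw [pvLoopA, dif_neg hi, List.drop_eq_nil_of_le (by omega)]
      simp [pvBRes]

-- ===== VERDICT (by name: the statement is the Claim_ definition above) =====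
theorem parse_str_spec : Claim_equal_parse_str := by
  intro s _
  unfold Spec_parse_str parse_str parse_str_alt
  rw [pvLoopA_eq s.toList (s.toList.length + 1) 0 [] (by omega)]
  simp [pvBRes]
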